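-- pv_equiv track=rewrite | github.com/unit0113/projects | Algorithms/Dynamic_Programming/subsetSum.py | memoTargetSum
-- ===== SOURCE A (Python) =====
-- def memoTargetSum(S, tgt):
--     k = len(S)
--     assert tgt >= 0
--     ## Fill in base case for T[(i,j)] where i == k
--     T = {} # Memo table initialized as empty dictionary
--     for j in range(tgt+1):
--         T[(k,j)] = j
--     # your code here
--     for i in range(k-1, -1, -1):
--         for j in range(tgt+1):
--             if j < S[i]:
--                 T[(i, j)] = T[(i+1, j)]
--             else:
--                 T[(i, j)] = min(T[(i+1, j)], T[(i+1, j-S[i])])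
--
--     return T
-- ===== SOURCE B (Python) =====
-- def memoTargetSum(S, tgt):
--     assert tgt >= 0
--     k = len(S)
--
--     def rows(suffix):
--         # DP rows for every suffix of `suffix`; rows(suffix)[0] is the row
--         # for the whole suffix, the last entry the base row (empty suffix).
--         if not suffix:
--             return [list(range(tgt + 1))]
--         rest = rows(suffix[1:])
--         nxt = rest[0]
--         s = suffix[0]
--         row = [nxt[j] if j < s else min(nxt[j], nxt[j - s]) for j in range(tgt + 1)]
--         return [row] + rest
--
--     rs = rows(S)  # rs[i] is the row for index i, rs[k] the base row
--     T = {}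
--     for i in range(k, -1, -1):
--         for j in range(tgt + 1):
--             T[(i, j)] = rs[i][j]
--     return T
-- ===== Notes on version B (the rewrite author's own statement) =====
-- stated objective: alternative
-- what changed: Replaces the bottom-up dict-lookup DP (nested index loops reading T[(i+1,...)] from the memo dict) by a recursion over the list structure that builds one plain row per suffix of S, then emits the memo table from those rows.
import Mathlib
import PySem

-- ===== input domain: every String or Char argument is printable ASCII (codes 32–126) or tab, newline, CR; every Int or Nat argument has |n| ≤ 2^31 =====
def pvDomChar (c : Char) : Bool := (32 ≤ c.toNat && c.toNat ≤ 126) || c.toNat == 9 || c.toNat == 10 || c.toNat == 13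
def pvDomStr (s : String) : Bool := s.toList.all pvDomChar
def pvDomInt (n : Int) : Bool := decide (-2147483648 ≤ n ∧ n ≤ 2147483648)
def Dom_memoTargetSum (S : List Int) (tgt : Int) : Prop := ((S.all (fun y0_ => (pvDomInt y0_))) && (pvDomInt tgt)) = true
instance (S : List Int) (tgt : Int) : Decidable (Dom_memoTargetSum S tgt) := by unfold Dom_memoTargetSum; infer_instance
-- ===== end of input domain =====

-- B replaces the bottom-up dict-lookup DP by a recursion over the list structure that
-- builds one plain row (list) per suffix, then emits the memo table from those rows
-- (objective: alternative decomposition, same asymptotic cost).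
-- The dict keyed by pairs (i, j) with value v is represented as the triple list (i, j, v).

-- ===== PORT A =====
def memoTargetSum (S : List Int) (tgt : Int) : List (Int × Int × Int) :=
  let k : Int := (S.length : Int)
  -- `assert tgt >= 0` raises for tgt < 0: excluded by Pre_
  let T0 : PySem.Dict (Int × Int) Int :=
    (PySem.List.pyRange 0 (tgt + 1) 1).foldl (fun T j => T.insert (k, j) j) PySem.Dict.empty
  let T1 :=
    (PySem.List.pyRange (k - 1) (-1) (-1)).foldl (fun T i =>
      (PySem.List.pyRange 0 (tgt + 1) 1).foldl (fun T j =>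
        -- T[(i+1, j)] / T[(i+1, j-S[i])] raise KeyError when absent (some S[i] < 0): excluded by Pre_
        if j < PySem.List.pyGetD S i 0 then
          T.insert (i, j) (T.getD (i + 1, j) 0)
        else
          T.insert (i, j) (min (T.getD (i + 1, j) 0)
                               (T.getD (i + 1, j - PySem.List.pyGetD S i 0) 0))) T) T0
  T1.items.map (fun p => (p.1.1, p.1.2, p.2))

-- ===== PORT B =====
def altRow (nxt : List Int) (s tgt : Int) : List Int :=
  (PySem.List.pyRange 0 (tgt + 1) 1).map (fun j =>
    if j < s then PySem.List.pyGetD nxt j 0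
    else min (PySem.List.pyGetD nxt j 0) (PySem.List.pyGetD nxt (j - s) 0))

def altRows (tgt : Int) : List Int → List (List Int)
  | [] => [PySem.List.pyRange 0 (tgt + 1) 1]
  | s :: rest =>
      let rs := altRows tgt rest
      altRow (rs.headD []) s tgt :: rs

def memoTargetSum_alt (S : List Int) (tgt : Int) : List (Int × Int × Int) :=
  let k : Int := (S.length : Int)
  let rs := altRows tgt S
  let T : PySem.Dict (Int × Int) Int :=
    (PySem.List.pyRange k (-1) (-1)).foldl (fun T i =>
      (PySem.List.pyRange 0 (tgt + 1) 1).foldl (fun T j =>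
        T.insert (i, j) (PySem.List.pyGetD (PySem.List.pyGetD rs i []) j 0)) T)
      PySem.Dict.empty
  T.items.map (fun p => (p.1.1, p.1.2, p.2))

-- ===== PRECONDITION & SPEC =====
-- A raises exactly when tgt < 0 (assert) or some element of S is negative
-- (the lookup T[(i+1, j-S[i])] then hits a missing key, KeyError); Pre_ excludes those.
def Pre_memoTargetSum (S : List Int) (tgt : Int) : Prop := 0 ≤ tgt ∧ ∀ x ∈ S, 0 ≤ x
instance (S : List Int) (tgt : Int) : Decidable (Pre_memoTargetSum S tgt) := by
  unfold Pre_memoTargetSum; infer_instance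

def pvWitness_memoTargetSum : List Int × Int := ([2, 3], 5)

def Spec_memoTargetSum (S : List Int) (tgt : Int) (out : List (Int × Int × Int)) : Prop := out = memoTargetSum_alt S tgt
instance (S : List Int) (tgt : Int) (out : List (Int × Int × Int)) : Decidable (Spec_memoTargetSum S tgt out) := by unfold Spec_memoTargetSum; infer_instance

-- ===== CLAIM (what is proved, stated in full; the proofs are below) =====
def Claim_equal_memoTargetSum : Prop := ∀ (S : List Int) (tgt : Int), Dom_memoTargetSum S tgt → Pre_memoTargetSum S tgt → Spec_memoTargetSum S tgt (memoTargetSum S tgt)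

-- ===== LEMMAS AND PROOFS =====

-- the DP value T[(i, j)] as a pure function of the suffix S[i:]
def rowVal : List Int → Int → Int
  | [], j => j
  | s :: rest, j => if j < s then rowVal rest j else min (rowVal rest j) (rowVal rest (j - s))

-- the canonical items list both dicts end up with, row by row
def canonEntries (S : List Int) (tgt : Int) (i : Int) : List ((Int × Int) × Int) :=
  (PySem.List.pyRange 0 (tgt + 1) 1).map (fun j => ((i, j), rowVal (S.drop i.toNat) j))

lemma altRow_eq (s tgt : Int) (hs : 0 ≤ s) (rest : List Int) :
    altRow ((PySem.List.pyRange 0 (tgt + 1) 1).map (fun j => rowVal rest j)) s tgt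
      = (PySem.List.pyRange 0 (tgt + 1) 1).map (fun j => rowVal (s :: rest) j) := by
  unfold altRow
  apply List.map_congr_left
  intro j hj
  have hjb := (PySem.List.mem_pyRange_one).1 hj
  have h1 : PySem.List.pyGetD ((PySem.List.pyRange 0 (tgt + 1) 1).map (fun j => rowVal rest j)) j 0 = rowVal rest j :=
    PySem.List.pyGetD_map_pyRange_of_nonneg _ _ _ _ hjb.1 hjb.2
  by_cases hlt : j < s
  · simp [rowVal, hlt, h1]
  · have h2 : PySem.List.pyGetD ((PySem.List.pyRange 0 (tgt + 1) 1).map (fun j => rowVal rest j)) (j - s) 0 = rowVal rest (j - s) :=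
      PySem.List.pyGetD_map_pyRange_of_nonneg _ _ _ _ (by omega) (by omega)
    simp [rowVal, hlt, h1, h2]

lemma altRows_length (tgt : Int) : ∀ suffix : List Int, (altRows tgt suffix).length = suffix.length + 1 := by
  intro suffix
  induction suffix with
  | nil => simp [altRows]
  | cons s rest ih => simp [altRows, ih]

lemma altRows_get (tgt : Int) :
    ∀ (suffix : List Int), (∀ x ∈ suffix, 0 ≤ x) → ∀ (n : Nat), n ≤ suffix.length →
      (altRows tgt suffix)[n]? =
        some ((PySem.List.pyRange 0 (tgt + 1) 1).map (fun j => rowVal (suffix.drop n) j)) := by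
  intro suffix
  induction suffix with
  | nil =>
      intro _ n hn
      have : n = 0 := by simpa using hn
      subst this
      simp [altRows, rowVal]
  | cons s rest ih =>
      intro hx n hn
      have hrest : ∀ x ∈ rest, 0 ≤ x := fun x hm => hx x (List.mem_cons_of_mem _ hm)
      have hs : 0 ≤ s := hx s (List.mem_cons_self ..)
      show (altRow ((altRows tgt rest).headD []) s tgt :: altRows tgt rest)[n]? = _
      cases n with
      | zero =>
          have h0 := ih hrest 0 (Nat.zero_le _)
          have hhead : (altRows tgt rest).headD []
              = (PySem.List.pyRange 0 (tgt + 1) 1).map (fun j => rowVal rest j) := by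
            rw [List.headD_eq_head?, List.head?_eq_getElem?, h0]
            simp
          simp only [List.getElem?_cons_zero, hhead, altRow_eq s tgt hs rest]
          simp
      | succ m =>
          have := ih hrest m (by simpa using hn)
          simpa using this

lemma A_inner (i si tgt : Int) (hsi : 0 ≤ si) (nextRow : Int → Int) :
    ∀ (J : List Int) (T : PySem.Dict (Int × Int) Int),
      (∀ j ∈ J, 0 ≤ j ∧ j < tgt + 1) → J.Nodup →
      (∀ j, 0 ≤ j → j < tgt + 1 → T.getD (i + 1, j) 0 = nextRow j) →
      (∀ j ∈ J, T.contains (i, j) = false) →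
      (J.foldl (fun T j =>
          if j < si then T.insert (i, j) (T.getD (i + 1, j) 0)
          else T.insert (i, j) (min (T.getD (i + 1, j) 0) (T.getD (i + 1, j - si) 0))) T).items
        = T.items ++ J.map (fun j => ((i, j),
            if j < si then nextRow j else min (nextRow j) (nextRow (j - si)))) := by
  intro J
  induction J with
  | nil => intro T _ _ _ _; simp
  | cons j0 J' ih =>
      intro T hb hnd hnext hfresh
      have hb0 := hb j0 (List.mem_cons_self ..)
      have hf0 : T.contains (i, j0) = false := hfresh j0 (List.mem_cons_self ..)
      have hT1eq : (if j0 < si then T.insert (i, j0) (T.getD (i + 1, j0) 0)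
          else T.insert (i, j0) (min (T.getD (i + 1, j0) 0) (T.getD (i + 1, j0 - si) 0)))
          = T.insert (i, j0)
            (if j0 < si then nextRow j0 else min (nextRow j0) (nextRow (j0 - si))) := by
        by_cases hlt : j0 < si
        · simp [hlt, hnext j0 hb0.1 hb0.2]
        · simp [hlt, hnext j0 hb0.1 hb0.2, hnext (j0 - si) (by omega) (by omega)]
      simp only [List.foldl_cons]
      rw [hT1eq]
      rw [ih (T.insert (i, j0) (if j0 < si then nextRow j0 else min (nextRow j0) (nextRow (j0 - si)))) (fun j hm => hb j (List.mem_cons_of_mem _ hm)) (List.Nodup.of_cons hnd)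
        (by
          intro j hj0 hjt
          rw [PySem.Dict.getD_insert, if_neg (by simp [Prod.ext_iff])]
          exact hnext j hj0 hjt)
        (by
          intro j hm
          rw [PySem.Dict.contains_insert]
          have hne : j ≠ j0 := fun h => (List.nodup_cons.1 hnd).1 (h ▸ hm)
          simp [hne, hfresh j (List.mem_cons_of_mem _ hm)])]
      rw [PySem.Dict.items_insert]
      simp [hf0]

lemma A_outer (S : List Int) (tgt : Int) (hS : ∀ x ∈ S, 0 ≤ x) :
    ∀ (n : Nat) (a : Int) (T : PySem.Dict (Int × Int) Int), (a + 1).toNat = n →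
      a < (S.length : Int) →
      (∀ p ∈ T.keys, a < p.1) → T.keys.Nodup →
      (∀ j, 0 ≤ j → j < tgt + 1 → T.getD (a + 1, j) 0 = rowVal (S.drop (a + 1).toNat) j) →
      ((PySem.List.pyRange a (-1) (-1)).foldl (fun T i =>
        (PySem.List.pyRange 0 (tgt + 1) 1).foldl (fun T j =>
          if j < PySem.List.pyGetD S i 0 then
            T.insert (i, j) (T.getD (i + 1, j) 0)
          else
            T.insert (i, j) (min (T.getD (i + 1, j) 0)
                                 (T.getD (i + 1, j - PySem.List.pyGetD S i 0) 0))) T) T).items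
        = T.items ++ (PySem.List.pyRange a (-1) (-1)).flatMap (canonEntries S tgt) := by
  intro n
  induction n with
  | zero =>
      intro a T hn _ _ _ _
      have ha : a ≤ -1 := by omega
      rw [PySem.List.pyRange_neg_one_eq_nil ha]
      simp
  | succ m ih =>
      intro a T hn halen hkeys hnd hnext
      have ha : 0 ≤ a := by omega
      rw [PySem.List.pyRange_neg_one_cons (by omega : (-1 : Int) < a)]
      simp only [List.foldl_cons, List.flatMap_cons]
      -- S[a]
      have halt : a.toNat < S.length := by omega
      have hsival : PySem.List.pyGetD S a 0 = S[a.toNat] :=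
        PySem.List.pyGetD_eq_getElem _ _ ha (by omega)
      have hsi : 0 ≤ PySem.List.pyGetD S a 0 := by
        rw [hsival]; exact hS _ (List.getElem_mem _)
      -- the inner loop appends row a
      have hinner := A_inner a (PySem.List.pyGetD S a 0) tgt hsi
        (rowVal (S.drop (a + 1).toNat)) (PySem.List.pyRange 0 (tgt + 1) 1) T
        (fun j hj => (PySem.List.mem_pyRange_one).1 hj)
        (PySem.List.nodup_pyRange_one _ _)
        hnext
        (by
          intro j _
          rw [PySem.Dict.contains_eq_decide_mem_keys]
          simp only [decide_eq_false_iff_not]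
          intro hmem
          exact absurd (hkeys _ hmem) (by simp))
      -- the appended row is canonEntries S tgt a
      have hrow : (PySem.List.pyRange 0 (tgt + 1) 1).map (fun j => ((a, j),
            if j < PySem.List.pyGetD S a 0 then rowVal (S.drop (a + 1).toNat) j
            else min (rowVal (S.drop (a + 1).toNat) j)
                     (rowVal (S.drop (a + 1).toNat) (j - PySem.List.pyGetD S a 0))))
          = canonEntries S tgt a := by
        unfold canonEntries
        apply List.map_congr_left
        intro j _
        have hdrop : S.drop a.toNat = S[a.toNat] :: S.drop (a.toNat + 1) :=
          List.drop_eq_getElem_cons halt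
        have h1 : (a + 1).toNat = a.toNat + 1 := by omega
        rw [hdrop, hsival, h1]
        simp [rowVal]
      set T1 := ((PySem.List.pyRange 0 (tgt + 1) 1).foldl (fun T j =>
          if j < PySem.List.pyGetD S a 0 then
            T.insert (a, j) (T.getD (a + 1, j) 0)
          else
            T.insert (a, j) (min (T.getD (a + 1, j) 0)
                                 (T.getD (a + 1, j - PySem.List.pyGetD S a 0) 0))) T) with hT1def
      have hT1items : T1.items = T.items ++ canonEntries S tgt a := by rw [hT1def, hinner, hrow]
      have hT1keys : T1.keys = T.keys ++ (PySem.List.pyRange 0 (tgt + 1) 1).map (fun j => (a, j)) := by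
        show T1.items.map (·.1) = _
        rw [hT1items]
        unfold canonEntries
        simp [PySem.Dict.keys, List.map_map, Function.comp]
      have hT1nd : T1.keys.Nodup := by
        rw [hT1keys]
        refine List.Nodup.append hnd ?_ ?_
        · exact List.Nodup.map (fun x y hxy => by simpa using hxy) (PySem.List.nodup_pyRange_one _ _)
        · intro p hp hq
          obtain ⟨j, _, rfl⟩ := List.mem_map.1 hq
          exact absurd (hkeys _ hp) (by simp)
      have hT1get : ∀ j, 0 ≤ j → j < tgt + 1 → T1.getD (a, j) 0 = rowVal (S.drop a.toNat) j := by
        intro j hj0 hjt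
        have hmem : ((a, j), rowVal (S.drop a.toNat) j) ∈ T1.items := by
          rw [hT1items]
          refine List.mem_append_right _ ?_
          unfold canonEntries
          exact List.mem_map.2 ⟨j, (PySem.List.mem_pyRange_one).2 ⟨hj0, hjt⟩, rfl⟩
        exact PySem.Dict.getD_of_mem_items _ hmem hT1nd 0
      have hrec := ih (a - 1) T1 (by omega) (by omega)
        (by
          intro p hp
          rw [hT1keys] at hp
          rcases List.mem_append.1 hp with h | h
          · have := hkeys _ h; omega
          · obtain ⟨j, _, rfl⟩ := List.mem_map.1 h; simp)
        hT1nd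
        (by
          intro j hj0 hjt
          have h1 : a - 1 + 1 = a := by omega
          rw [h1]
          exact hT1get j hj0 hjt)
      rw [hrec, hT1items]
      simp

lemma B_outer (v : Int → Int → Int) (tgt : Int) :
    ∀ (n : Nat) (a : Int) (T : PySem.Dict (Int × Int) Int), (a + 1).toNat = n →
      (∀ p ∈ T.keys, a < p.1) → T.keys.Nodup →
      ((PySem.List.pyRange a (-1) (-1)).foldl (fun T i =>
        (PySem.List.pyRange 0 (tgt + 1) 1).foldl (fun T j => T.insert (i, j) (v i j)) T) T).items
        = T.items ++ (PySem.List.pyRange a (-1) (-1)).flatMap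
            (fun i => (PySem.List.pyRange 0 (tgt + 1) 1).map (fun j => ((i, j), v i j))) := by
  intro n
  induction n with
  | zero =>
      intro a T hn _ _
      rw [PySem.List.pyRange_neg_one_eq_nil (by omega : a ≤ -1)]
      simp
  | succ m ih =>
      intro a T hn hkeys hnd
      have ha : 0 ≤ a := by omega
      rw [PySem.List.pyRange_neg_one_cons (by omega : (-1 : Int) < a)]
      simp only [List.foldl_cons, List.flatMap_cons]
      have hfresh : ∀ j ∈ PySem.List.pyRange 0 (tgt + 1) 1, T.contains ((a, j) : Int × Int) = false := by
        intro j _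
        rw [PySem.Dict.contains_eq_decide_mem_keys]
        simp only [decide_eq_false_iff_not]
        intro hmem
        exact absurd (hkeys _ hmem) (by simp)
      have hmapnd : ((PySem.List.pyRange 0 (tgt + 1) 1).map (fun j => ((a, j) : Int × Int))).Nodup :=
        List.Nodup.map (fun x y hxy => by simpa using hxy) (PySem.List.nodup_pyRange_one _ _)
      have hinner := PySem.Dict.items_foldl_insert_fresh (PySem.List.pyRange 0 (tgt + 1) 1)
        (k := fun j => ((a, j) : Int × Int)) (v := fun j => v a j) (d := T) hfresh hmapnd
      set T1 := (PySem.List.pyRange 0 (tgt + 1) 1).foldl (fun T j => T.insert (a, j) (v a j)) T with hT1def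
      have hT1items : T1.items = T.items ++ (PySem.List.pyRange 0 (tgt + 1) 1).map (fun j => ((a, j), v a j)) := hinner
      have hT1keys : T1.keys = T.keys ++ (PySem.List.pyRange 0 (tgt + 1) 1).map (fun j => (a, j)) := by
        show T1.items.map (·.1) = _
        rw [hT1items]
        simp [PySem.Dict.keys, List.map_map, Function.comp]
      have hT1nd : T1.keys.Nodup := by
        rw [hT1keys]
        refine List.Nodup.append hnd hmapnd ?_
        intro p hp hq
        obtain ⟨j, _, rfl⟩ := List.mem_map.1 hq
        exact absurd (hkeys _ hp) (by simp)
      have hrec := ih (a - 1) T1 (by omega)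
        (by
          intro p hp
          rw [hT1keys] at hp
          rcases List.mem_append.1 hp with h | h
          · have := hkeys _ h; omega
          · obtain ⟨j, _, rfl⟩ := List.mem_map.1 h; simp)
        hT1nd
      rw [hrec, hT1items]
      simp

lemma pvFlatMapCongr {α β : Type} {l : List α} {f g : α → List β}
    (h : ∀ a ∈ l, f a = g a) : l.flatMap f = l.flatMap g := by
  induction l with
  | nil => simp
  | cons x xs ih =>
      simp only [List.flatMap_cons]
      rw [h x (List.mem_cons_self ..), ih (fun a ha => h a (List.mem_cons_of_mem _ ha))]

lemma baseRow_eq_canon (S : List Int) (tgt : Int) :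
    (PySem.List.pyRange 0 (tgt + 1) 1).map (fun j => ((((S.length : Int)), j), j))
      = canonEntries S tgt (S.length : Int) := by
  unfold canonEntries
  apply List.map_congr_left
  intro j _
  have : S.drop ((S.length : Int)).toNat = [] := by simp
  rw [this]
  simp [rowVal]

lemma A_items (S : List Int) (tgt : Int) (hS : ∀ x ∈ S, 0 ≤ x) :
    memoTargetSum S tgt =
      ((PySem.List.pyRange (S.length : Int) (-1) (-1)).flatMap (canonEntries S tgt)).map
        (fun p => (p.1.1, p.1.2, p.2)) := by
  rw [memoTargetSum]
  have hmapnd : ((PySem.List.pyRange 0 (tgt + 1) 1).map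
      (fun j => (((S.length : Int), j) : Int × Int))).Nodup :=
    List.Nodup.map (fun x y hxy => by simpa using hxy) (PySem.List.nodup_pyRange_one _ _)
  have hT0 := PySem.Dict.items_foldl_insert_fresh (PySem.List.pyRange 0 (tgt + 1) 1)
    (k := fun j => (((S.length : Int), j) : Int × Int)) (v := fun j => j)
    (d := PySem.Dict.empty) (by intro a _; simp) hmapnd
  set T0 := (PySem.List.pyRange 0 (tgt + 1) 1).foldl
    (fun T j => T.insert ((S.length : Int), j) j) PySem.Dict.empty with hT0def
  have hT0items : T0.items
      = (PySem.List.pyRange 0 (tgt + 1) 1).map (fun j => (((S.length : Int), j), j)) := by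
    simpa using hT0
  have hT0keys : T0.keys
      = (PySem.List.pyRange 0 (tgt + 1) 1).map (fun j => ((S.length : Int), j)) := by
    show T0.items.map (·.1) = _
    rw [hT0items]
    simp [List.map_map, Function.comp]
  have hT0nd : T0.keys.Nodup := by rw [hT0keys]; exact hmapnd
  have hget : ∀ j : Int, 0 ≤ j → j < tgt + 1 → T0.getD ((S.length : Int), j) 0 = j := by
    intro j hj0 hjt
    have hmem : ((((S.length : Int)), j), j) ∈ T0.items := by
      rw [hT0items]
      exact List.mem_map.2 ⟨j, (PySem.List.mem_pyRange_one).2 ⟨hj0, hjt⟩, rfl⟩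
    exact PySem.Dict.getD_of_mem_items _ hmem hT0nd 0
  have hout := A_outer S tgt hS (S.length) ((S.length : Int) - 1) T0 (by omega) (by omega)
    (by intro p hp; rw [hT0keys] at hp; obtain ⟨j, _, rfl⟩ := List.mem_map.1 hp; simp)
    hT0nd
    (by
      intro j hj0 hjt
      have h1 : (S.length : Int) - 1 + 1 = (S.length : Int) := by omega
      rw [h1]
      have h2 : S.drop ((S.length : Int)).toNat = [] := by simp
      rw [h2]
      show T0.getD ((S.length : Int), j) 0 = rowVal [] j
      rw [hget j hj0 hjt]
      simp [rowVal])
  rw [hout, hT0items]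
  rw [PySem.List.pyRange_neg_one_cons (by omega : (-1 : Int) < (S.length : Int))]
  simp only [List.flatMap_cons]
  rw [baseRow_eq_canon]

lemma B_items (S : List Int) (tgt : Int) (hS : ∀ x ∈ S, 0 ≤ x) :
    memoTargetSum_alt S tgt =
      ((PySem.List.pyRange (S.length : Int) (-1) (-1)).flatMap (canonEntries S tgt)).map
        (fun p => (p.1.1, p.1.2, p.2)) := by
  rw [memoTargetSum_alt]
  have hout := B_outer
    (fun i j => PySem.List.pyGetD (PySem.List.pyGetD (altRows tgt S) i []) j 0) tgt
    (((S.length : Int) + 1).toNat) (S.length : Int) PySem.Dict.empty rfl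
    (by intro p hp; simp [PySem.Dict.keys_empty] at hp) (by simp [PySem.Dict.keys_empty])
  rw [hout]
  have hcongr : (PySem.List.pyRange (S.length : Int) (-1) (-1)).flatMap
      (fun i => (PySem.List.pyRange 0 (tgt + 1) 1).map
        (fun j => ((i, j), PySem.List.pyGetD (PySem.List.pyGetD (altRows tgt S) i []) j 0)))
      = (PySem.List.pyRange (S.length : Int) (-1) (-1)).flatMap (canonEntries S tgt) := by
    apply pvFlatMapCongr
    intro i hi
    have hib := (PySem.List.mem_pyRange_neg_one).1 hi
    have hi0 : 0 ≤ i := by omega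
    have hilen : i ≤ (S.length : Int) := hib.2
    have hlen : (altRows tgt S).length = S.length + 1 := altRows_length tgt S
    have hrow : PySem.List.pyGetD (altRows tgt S) i []
        = (PySem.List.pyRange 0 (tgt + 1) 1).map (fun j => rowVal (S.drop i.toNat) j) := by
      have h1 : PySem.List.pyGetD (altRows tgt S) i [] = (altRows tgt S)[i.toNat]'(by omega) :=
        PySem.List.pyGetD_eq_getElem _ _ hi0 (by omega)
      have h2 := altRows_get tgt S hS i.toNat (by omega)
      rw [List.getElem?_eq_getElem (by omega)] at h2
      rw [h1, Option.some.inj h2]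
    unfold canonEntries
    apply List.map_congr_left
    intro j hj
    have hjb := (PySem.List.mem_pyRange_one).1 hj
    rw [hrow, PySem.List.pyGetD_map_pyRange_of_nonneg _ _ _ _ hjb.1 hjb.2]
  rw [hcongr]
  rfl

-- ===== VERDICT (by name: the statement is the Claim_ definition above) =====
theorem memoTargetSum_spec : Claim_equal_memoTargetSum := by
  intro S tgt _hDom hPre
  unfold Spec_memoTargetSum
  rw [A_items S tgt hPre.2, B_items S tgt hPre.2]
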